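-- pv_equiv track=rewrite | github.com/eriglesias/RosettaFables | src/aesop_spacy/analysis/syntax_analyzer.py | _get_word_order
-- ===== SOURCE A (Python) =====
-- def _get_word_order(subj_pos, verb_pos, obj_pos):
--     """
--     Determine word order pattern from positions with improved validation.
--
--     Args:
--         subj_pos: Position of subject
--         verb_pos: Position of verb
--         obj_pos: Position of object
--
--     Returns:
--         String representing word order pattern (SVO, SOV, etc.)
--     """
--     # Check for invalid or None positions
--     if subj_pos is None or verb_pos is None or obj_pos is None:
--         return "other"
--
--     if subj_pos < 0 or verb_pos < 0 or obj_pos < 0: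
--         return "other"
--
--     # Check for unusually distant components (typically indicates parsing issues)
--     max_distance = 30
--     if (abs(subj_pos - verb_pos) > max_distance or
--         abs(verb_pos - obj_pos) > max_distance or
--         abs(subj_pos - obj_pos) > max_distance):
--         return "other"
--
--     positions = [
--         ('S', subj_pos),
--         ('V', verb_pos),
--         ('O', obj_pos)
--     ]
--
--     # Sort by position
--     positions.sort(key=lambda x: x[1])
--
--     # Build pattern string
--     pattern = ''.join(pos[0] for pos in positions)
--
--     return pattern
-- ===== SOURCE B (Python) =====
-- def _get_word_order(subj_pos, verb_pos, obj_pos):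
--     """Same guards as A, then the permutation is decided by an if/elif
--     cascade over pairwise comparisons (ties keep S,V,O order, matching
--     the stable sort)."""
--     if subj_pos is None or verb_pos is None or obj_pos is None:
--         return "other"
--     if subj_pos < 0 or verb_pos < 0 or obj_pos < 0:
--         return "other"
--     max_distance = 30
--     if (abs(subj_pos - verb_pos) > max_distance or
--         abs(verb_pos - obj_pos) > max_distance or
--         abs(subj_pos - obj_pos) > max_distance):
--         return "other"
--     if subj_pos <= verb_pos:
--         if verb_pos <= obj_pos:
--             return "SVO"
--         elif subj_pos <= obj_pos:
--             return "SOV"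
--         else:
--             return "OSV"
--     else:
--         if subj_pos <= obj_pos:
--             return "VSO"
--         elif verb_pos <= obj_pos:
--             return "VOS"
--         else:
--             return "OVS"
-- ===== Notes on version B (the rewrite author's own statement) =====
-- stated objective: simpler
-- what changed: Replaced building a labeled list, stable-sorting it by position and joining the labels with a direct if/elif cascade over the pairwise comparisons (ties kept in S,V,O order) that returns the pattern string as a literal.
import Mathlib
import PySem

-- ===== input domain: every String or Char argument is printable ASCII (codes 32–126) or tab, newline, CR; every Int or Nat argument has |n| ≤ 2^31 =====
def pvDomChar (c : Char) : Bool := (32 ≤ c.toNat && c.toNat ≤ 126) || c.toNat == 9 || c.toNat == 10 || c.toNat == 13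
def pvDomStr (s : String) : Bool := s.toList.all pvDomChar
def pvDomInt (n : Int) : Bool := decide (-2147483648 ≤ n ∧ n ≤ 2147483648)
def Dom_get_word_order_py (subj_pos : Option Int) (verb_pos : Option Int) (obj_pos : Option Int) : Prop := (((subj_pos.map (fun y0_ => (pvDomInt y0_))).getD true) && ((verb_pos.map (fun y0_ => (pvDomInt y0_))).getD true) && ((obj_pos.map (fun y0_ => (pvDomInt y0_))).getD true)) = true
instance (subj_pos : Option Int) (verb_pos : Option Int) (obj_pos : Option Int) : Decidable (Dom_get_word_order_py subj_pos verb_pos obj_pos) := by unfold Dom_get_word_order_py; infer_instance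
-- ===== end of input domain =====

-- ===== PORT A =====
-- B replaces the sort-and-join with a pairwise-comparison cascade (simpler).
def get_word_order_py (subj_pos : Option Int) (verb_pos : Option Int) (obj_pos : Option Int) : String :=
  match subj_pos, verb_pos, obj_pos with
  | some sp, some vp, some op =>
    if sp < 0 ∨ vp < 0 ∨ op < 0 then "other"
    else
      let max_distance : Int := 30
      if |sp - vp| > max_distance ∨ |vp - op| > max_distance ∨ |sp - op| > max_distance then
        "other"
      else
        let positions : List (String × Int) := [("S", sp), ("V", vp), ("O", op)]
        let positions := PySem.List.sorted positions (fun x => x.2) false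
        let pattern := String.join (positions.map (fun p => p.1))
        pattern
  | _, _, _ => "other"

-- ===== PORT B =====
def get_word_order_py_alt (subj_pos : Option Int) (verb_pos : Option Int) (obj_pos : Option Int) : String :=
  match subj_pos with
  | none => "other"
  | some sp =>
  match verb_pos with
  | none => "other"
  | some vp =>
  match obj_pos with
  | none => "other"
  | some op =>
    if sp < 0 ∨ vp < 0 ∨ op < 0 then "other"
    else if |sp - vp| > 30 ∨ |vp - op| > 30 ∨ |sp - op| > 30 then "other"
    else if sp ≤ vp then
      if vp ≤ op then "SVO"
      else if sp ≤ op then "SOV"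
      else "OSV"
    else
      if sp ≤ op then "VSO"
      else if vp ≤ op then "VOS"
      else "OVS"

-- ===== PRECONDITION & SPEC =====
def Spec_get_word_order_py (subj_pos : Option Int) (verb_pos : Option Int) (obj_pos : Option Int) (out : String) : Prop := out = get_word_order_py_alt subj_pos verb_pos obj_pos
instance (subj_pos : Option Int) (verb_pos : Option Int) (obj_pos : Option Int) (out : String) : Decidable (Spec_get_word_order_py subj_pos verb_pos obj_pos out) := by unfold Spec_get_word_order_py; infer_instance

-- ===== CLAIM (what is proved, stated in full; the proofs are below) =====
def Claim_equal_get_word_order_py : Prop := ∀ (subj_pos : Option Int) (verb_pos : Option Int) (obj_pos : Option Int), Dom_get_word_order_py subj_pos verb_pos obj_pos → Spec_get_word_order_py subj_pos verb_pos obj_pos (get_word_order_py subj_pos verb_pos obj_pos)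

-- ===== LEMMAS AND PROOFS =====

-- ===== VERDICT (by name: the statement is the Claim_ definition above) =====
theorem get_word_order_py_spec : Claim_equal_get_word_order_py := by
  intro subj_pos verb_pos obj_pos _
  unfold Spec_get_word_order_py
  rcases subj_pos with _ | sp <;> rcases verb_pos with _ | vp <;> rcases obj_pos with _ | op <;>
    simp only [get_word_order_py, get_word_order_py_alt]
  simp only [PySem.List.sorted_eq_foldl_insertBy, PySem.List.insertBy, List.foldl]
  split_ifs <;> simp only [decide_eq_true_eq] at * <;>
    first
    | rfl
    | (exfalso; omega)
    | (simp only [PySem.List.insertBy]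
       split_ifs <;> simp only [decide_eq_true_eq] at * <;>
         first | rfl | (exfalso; omega))
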